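-- pv_equiv track=rewrite | github.com/OrionFLASH/RAR_brute_force_attack | src/rar_bruteforce/generators.py | _iter_digit_strings
-- ===== SOURCE A (Python) =====
-- from typing import Iterable, Iterator
--
-- def _iter_digit_strings(min_len: int, max_len: int) -> Iterator[str]:
--     """
--     Строки из цифр длиной от min_len до max_len (включительно).
--
--     Для длины L перебираются все значения от 0 до 10^L-1 с дополнением нулями слева (00…09 для L=2).
--     """
--     if max_len < min_len or min_len < 0:
--         return
--     for length in range(min_len, max_len + 1):
--         if length == 0:
--             yield ""
--             continue
--         for n in range(0, 10**length):
--             yield str(n).zfill(length)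
-- ===== SOURCE B (Python) =====
-- from typing import Iterator
--
--
-- def _iter_digit_strings(min_len: int, max_len: int) -> Iterator[str]:
--     """Digit strings of each length, built as the Cartesian product of '0123456789'."""
--     if max_len < min_len or min_len < 0:
--         return
--     for length in range(min_len, max_len + 1):
--         combos = [""]
--         for _ in range(length):
--             combos = [s + c for s in combos for c in "0123456789"]
--         yield from combos
-- ===== Notes on version B (the rewrite author's own statement) =====
-- stated objective: alternative
-- what changed: Replaces counting integers 0..10^L-1 with str/zfill formatting by a Cartesian-product construction over the digit characters, growing the combination list one character position at a time (length 0 needs no special branch).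
import Mathlib
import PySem

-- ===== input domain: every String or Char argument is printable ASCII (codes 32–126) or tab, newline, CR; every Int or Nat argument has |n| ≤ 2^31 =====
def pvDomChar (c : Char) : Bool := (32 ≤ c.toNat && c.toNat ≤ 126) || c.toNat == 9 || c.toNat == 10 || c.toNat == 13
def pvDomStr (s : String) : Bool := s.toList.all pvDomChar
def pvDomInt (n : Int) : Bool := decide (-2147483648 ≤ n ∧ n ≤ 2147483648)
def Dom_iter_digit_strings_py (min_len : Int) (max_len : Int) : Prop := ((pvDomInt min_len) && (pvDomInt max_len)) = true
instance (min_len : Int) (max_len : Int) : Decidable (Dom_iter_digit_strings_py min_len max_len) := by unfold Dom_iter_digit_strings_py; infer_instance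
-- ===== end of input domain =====

-- B replaces A's integer counting + str().zfill() by a Cartesian-product construction over
-- the digit characters (same output, same cost; objective: alternative algorithm).

-- ===== PORT A =====
-- Port of A (`_iter_digit_strings`): for each length, count n over range(0, 10**length) and
-- yield str(n).zfill(length); inside the loop min_len ≤ length is ≥ 0, so 10**length is 10^length.toNat.
def iter_digit_strings_py (min_len : Int) (max_len : Int) : List String :=
  if max_len < min_len ∨ min_len < 0 then []
  else
    (PySem.List.pyRange min_len (max_len + 1)).foldl
      (fun acc length =>
        acc ++
          (if length == 0 then [""]
           else (PySem.List.pyRange 0 ((10 : Int) ^ length.toNat)).map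
             (fun n => PySem.Str.zfill (PySem.Int.toStr n) length)))
      []

-- ===== PORT B =====
def pvDigitChars : List Char := ['0', '1', '2', '3', '4', '5', '6', '7', '8', '9']

-- Port of B: for each length, grow the list of combinations one character position at a
-- time (combos = [s + c for s in combos for c in "0123456789"]); strings are modelled as
-- List Char while being built and converted by String.ofList when yielded.
def iter_digit_strings_py_alt (min_len : Int) (max_len : Int) : List String :=
  if max_len < min_len ∨ min_len < 0 then []
  else
    (PySem.List.pyRange min_len (max_len + 1)).flatMap
      (fun length =>
        ((PySem.List.pyRange 0 length).foldl
            (fun combos _ => combos.flatMap (fun s => pvDigitChars.map (fun c => s ++ [c])))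
            [[]]).map String.ofList)

-- ===== PRECONDITION & SPEC =====
def Spec_iter_digit_strings_py (min_len : Int) (max_len : Int) (out : List String) : Prop := out = iter_digit_strings_py_alt min_len max_len
instance (min_len : Int) (max_len : Int) (out : List String) : Decidable (Spec_iter_digit_strings_py min_len max_len out) := by unfold Spec_iter_digit_strings_py; infer_instance

-- ===== CLAIM (what is proved, stated in full; the proofs are below) =====
def Claim_equal_iter_digit_strings_py : Prop := ∀ (min_len : Int) (max_len : Int), Dom_iter_digit_strings_py min_len max_len → Spec_iter_digit_strings_py min_len max_len (iter_digit_strings_py min_len max_len)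

-- ===== LEMMAS AND PROOFS =====

-- Decimal digit characters of n, most significant first, via explicit fuel (mirrors Nat.toDigitsCore).
def pvRepGo (fuel n : Nat) : List Char :=
  match fuel with
  | 0 => []
  | fuel + 1 =>
    if n < 10 then [Nat.digitChar n]
    else pvRepGo fuel (n / 10) ++ [Nat.digitChar (n % 10)]

def pvRep (n : Nat) : List Char := pvRepGo (n + 1) n

theorem pvRepGo_fuel {f f' n : Nat} (h : n < f) (h' : n < f') : pvRepGo f n = pvRepGo f' n := by
  induction f generalizing f' n with
  | zero => omega
  | succ f ih =>
    cases f' with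
    | zero => omega
    | succ f' =>
      simp only [pvRepGo]
      by_cases h10 : n < 10
      · simp [h10]
      · have hd : n / 10 < n := Nat.div_lt_self (by omega) (by omega)
        simp only [h10, if_false]
        rw [ih (show n / 10 < f by omega) (show n / 10 < f' by omega)]

theorem pvRep_eq (n : Nat) :
    pvRep n = if n < 10 then [Nat.digitChar n] else pvRep (n / 10) ++ [Nat.digitChar (n % 10)] := by
  by_cases h10 : n < 10
  · simp [pvRep, pvRepGo, h10]
  · have hd : n / 10 < n := Nat.div_lt_self (by omega) (by omega)
    rw [if_neg h10]
    have h1 : pvRep n = pvRepGo n (n / 10) ++ [Nat.digitChar (n % 10)] := by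
      simp [pvRep, pvRepGo, h10]
    rw [h1, pvRepGo_fuel (show n / 10 < n from hd) (Nat.lt_succ_self _)]
    rfl

theorem toDigitsCore_eq_pvRep (f n : Nat) (acc : List Char) (h : n < f) :
    Nat.toDigitsCore 10 f n acc = pvRep n ++ acc := by
  induction f generalizing n acc with
  | zero => omega
  | succ f ih =>
    rw [pvRep_eq]
    simp only [Nat.toDigitsCore]
    by_cases h10 : n < 10
    · have : n / 10 = 0 := Nat.div_eq_of_lt h10
      simp [this, h10, Nat.mod_eq_of_lt h10]
    · have h0 : ¬ n / 10 = 0 := by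
        intro h0; exact h10 (by omega : n < 10)
      simp only [h0, if_false, h10]
      rw [ih (n / 10) _ (by omega)]
      simp

theorem toChars_natCast (n : Nat) : PySem.Int.toChars (n : Int) = pvRep n := by
  simp only [PySem.Int.toChars]
  rw [if_neg (by omega)]
  simp only [Int.toNat_natCast, Nat.toDigits]
  rw [toDigitsCore_eq_pvRep _ _ _ (Nat.lt_succ_self n)]
  simp

theorem pvRep_head (n : Nat) : ∃ c cs, pvRep n = c :: cs ∧ c ≠ '+' ∧ c ≠ '-' := by
  induction n using Nat.strong_induction_on with
  | _ n ih =>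
    rw [pvRep_eq]
    by_cases h10 : n < 10
    · refine ⟨Nat.digitChar n, [], by simp [h10], ?_, ?_⟩ <;> (interval_cases n <;> decide)
    · have hd : n / 10 < n := Nat.div_lt_self (by omega) (by omega)
      obtain ⟨c, cs, hrep, hp, hm⟩ := ih (n / 10) hd
      exact ⟨c, cs ++ [Nat.digitChar (n % 10)], by simp [h10, hrep], hp, hm⟩

-- A's padded digit string of width k.
def pvPadded (k n : Nat) : List Char := List.replicate (k - (pvRep n).length) '0' ++ pvRep n

theorem zfill_pvRep (n : Nat) (w : Int) :
    PySem.Chars.zfill (pvRep n) w = List.replicate (w.toNat - (pvRep n).length) '0' ++ pvRep n := by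
  obtain ⟨c, cs, hrep, hp, hm⟩ := pvRep_head n
  simp only [PySem.Chars.zfill]
  by_cases hle : w ≤ (pvRep n).length
  · have h0 : w.toNat - (pvRep n).length = 0 := by omega
    simp [hle, h0]
  · rw [if_neg hle, hrep]
    simp [hp, hm]

theorem zfill_toStr (n k : Nat) :
    PySem.Str.zfill (PySem.Int.toStr (n : Int)) (k : Int) = String.ofList (pvPadded k n) := by
  simp only [PySem.Str.zfill, PySem.Int.toList_toStr, toChars_natCast, zfill_pvRep, pvPadded,
    Int.toNat_natCast]

-- one product step of B: append every digit character to every combination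
def pvStep (xs : List (List Char)) : List (List Char) :=
  xs.flatMap (fun s => pvDigitChars.map (fun c => s ++ [c]))

theorem foldl_pvStep (l : List Int) (init : List (List Char)) :
    l.foldl (fun combos _ => combos.flatMap (fun s => pvDigitChars.map (fun c => s ++ [c]))) init
      = pvStep^[l.length] init := by
  induction l generalizing init with
  | nil => rfl
  | cons x xs ih =>
    rw [List.foldl_cons, ih, List.length_cons, Function.iterate_succ_apply]
    rfl

theorem pvPadded_succ (k n : Nat) (hk : 1 ≤ k) :
    pvPadded (k + 1) n = pvPadded k (n / 10) ++ [Nat.digitChar (n % 10)] := by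
  by_cases h10 : n < 10
  · have h0 : n / 10 = 0 := Nat.div_eq_of_lt h10
    have hrn : pvRep n = [Nat.digitChar n] := by rw [pvRep_eq]; simp [h10]
    have hr0 : pvRep 0 = ['0'] := by decide
    obtain ⟨m, rfl⟩ : ∃ m, k = m + 1 := ⟨k - 1, by omega⟩
    simp only [pvPadded, h0, hrn, hr0, Nat.mod_eq_of_lt h10, List.length_cons,
      List.length_nil]
    rw [show m + 1 + 1 - 1 = m + 1 by omega, show m + 1 - 1 = m by omega,
      List.replicate_succ' (n := m) (a := '0')]
  · have hrn : pvRep n = pvRep (n / 10) ++ [Nat.digitChar (n % 10)] := by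
      rw [pvRep_eq]; simp [h10]
    simp only [pvPadded, hrn, List.length_append, List.length_cons, List.length_nil]
    rw [show k + 1 - ((pvRep (n / 10)).length + (0 + 1)) = k - (pvRep (n / 10)).length by omega]
    simp [List.append_assoc]

theorem range_mul_ten (a : Nat) :
    List.range (a * 10)
      = (List.range a).flatMap (fun q => (List.range 10).map (fun r => q * 10 + r)) := by
  induction a with
  | zero => simp
  | succ a ih =>
    rw [show (a + 1) * 10 = a * 10 + 10 by ring, List.range_add, ih,
      List.range_succ (n := a), List.flatMap_append]
    simp

theorem pvDigitChars_eq : pvDigitChars = (List.range 10).map Nat.digitChar := by decide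

theorem map_padded_eq_prod (k : Nat) :
    (List.range (10 ^ (k + 1))).map (pvPadded (k + 1)) = pvStep^[k + 1] [[]] := by
  induction k with
  | zero => decide
  | succ k ih =>
    rw [show 10 ^ (k + 1 + 1) = 10 ^ (k + 1) * 10 by ring, range_mul_ten, List.map_flatMap]
    have hinner : ∀ q ∈ List.range (10 ^ (k + 1)),
        ((List.range 10).map (fun r => q * 10 + r)).map (pvPadded (k + 1 + 1))
          = pvDigitChars.map (fun c => pvPadded (k + 1) q ++ [c]) := by
      intro q _
      rw [List.map_map, pvDigitChars_eq, List.map_map]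
      apply List.map_congr_left
      intro r hr
      have hr10 : r < 10 := List.mem_range.mp hr
      show pvPadded (k + 1 + 1) (q * 10 + r) = pvPadded (k + 1) q ++ [Nat.digitChar r]
      rw [pvPadded_succ (k + 1) _ (by omega)]
      have hdiv : (q * 10 + r) / 10 = q := by omega
      have hmod : (q * 10 + r) % 10 = r := by omega
      rw [hdiv, hmod]
    have hflat : (List.range (10 ^ (k + 1))).flatMap
          (fun q => ((List.range 10).map (fun r => q * 10 + r)).map (pvPadded (k + 1 + 1)))
        = (List.range (10 ^ (k + 1))).flatMap
          (fun q => pvDigitChars.map (fun c => pvPadded (k + 1) q ++ [c])) := by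
      simp only [List.flatMap_def]
      exact congrArg List.flatten (List.map_congr_left hinner)
    rw [hflat]
    have hstep : (List.range (10 ^ (k + 1))).flatMap
          (fun q => pvDigitChars.map (fun c => pvPadded (k + 1) q ++ [c]))
        = pvStep ((List.range (10 ^ (k + 1))).map (pvPadded (k + 1))) := by
      rw [pvStep, List.flatMap_map]
    rw [hstep, ih, ← Function.iterate_succ_apply' pvStep (k + 1)]

-- the chunk A yields for one length equals the chunk B yields for that length
theorem per_length (L : Int) (hL : 0 ≤ L) :
    (if L == 0 then [""]
     else (PySem.List.pyRange 0 ((10 : Int) ^ L.toNat)).map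
       (fun n => PySem.Str.zfill (PySem.Int.toStr n) L))
    = ((PySem.List.pyRange 0 L).foldl
        (fun combos _ => combos.flatMap (fun s => pvDigitChars.map (fun c => s ++ [c])))
        [[]]).map String.ofList := by
  obtain ⟨m, rfl⟩ := Int.eq_ofNat_of_zero_le hL
  have hlen : (PySem.List.pyRange 0 (m : Int)).length = m := by
    rw [PySem.List.pyRange_zero_natCast]; simp
  rw [foldl_pvStep, hlen]
  cases m with
  | zero => decide
  | succ m =>
    rw [if_neg (by simp; omega)]
    have hc : ((10 : Int) ^ ((m + 1 : Nat) : Int).toNat) = ((10 ^ (m + 1) : Nat) : Int) := by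
      push_cast; simp
    rw [hc, PySem.List.pyRange_zero_natCast, List.map_map]
    have key : (List.range (10 ^ (m + 1))).map
          ((fun n => PySem.Str.zfill (PySem.Int.toStr n) ((m + 1 : Nat) : Int)) ∘ (fun (k : Nat) => (k : Int)))
        = ((List.range (10 ^ (m + 1))).map (pvPadded (m + 1))).map String.ofList := by
      rw [List.map_map]
      apply List.map_congr_left
      intro j _
      exact zfill_toStr j (m + 1)
    rw [key, map_padded_eq_prod]

-- ===== VERDICT (by name: the statement is the Claim_ definition above) =====
theorem iter_digit_strings_py_spec : Claim_equal_iter_digit_strings_py := by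
  intro min_len max_len _
  unfold Spec_iter_digit_strings_py iter_digit_strings_py iter_digit_strings_py_alt
  by_cases hguard : max_len < min_len ∨ min_len < 0
  · simp [hguard]
  · rw [if_neg hguard, if_neg hguard]
    rw [PySem.List.foldl_append_eq_flatMap, List.nil_append]
    simp only [List.flatMap_def]
    apply congrArg List.flatten
    apply List.map_congr_left
    intro L hL
    have h0L : 0 ≤ L := by
      have h1 := (PySem.List.mem_pyRange_one.mp hL).1
      omega
    exact per_length L h0L
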